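-- pv_equiv track=rewrite | github.com/zhijiazhang/advent-of-code-2023 | day1/puzzle1_part2.py | calc
-- ===== SOURCE A (Python) =====
-- nums = {
--     "o" : [("1", "one", 3)],
--     "t" : [("2", "two", 3), ("3", "three", 5)],
--     "f" : [("4", "four", 4), ("5", "five", 4)],
--     "s" : [("6", "six", 3), ("7", "seven", 5)],
--     "e" : [("8", "eight", 5)],
--     "n" : [("9", "nine", 4)]
-- }
--
-- def calc(line: str, i: int, n: int) -> str:
--     char = line[i]
--     if char.isnumeric():
--         return char
--
--     if char in nums:
--         for digit, number, length in nums[char]: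
--             if i + length - 1 < n:
--                 if line[i:i+length] == number:
--                     return digit
--     return None
-- ===== SOURCE B (Python) =====
-- # One five-character window sliced once, then matched with str.startswith over a
-- # flat word->digit map, instead of per-word slices dispatched by a first-letter dict.
-- WORDS = {"one": "1", "two": "2", "three": "3", "four": "4", "five": "5",
--          "six": "6", "seven": "7", "eight": "8", "nine": "9"}
--
--
-- def calc(line: str, i: int, n: int) -> str:
--     char = line[i]
--     if char.isnumeric():
--         return char
--     window = line[i:][:5]
--     for word, digit in WORDS.items():
--         if i + len(word) <= n and window.startswith(word):
--             return digit
--     return None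
-- ===== Notes on version B (the rewrite author's own statement) =====
-- stated objective: simpler
-- what changed: Replaces A's first-letter dict of (digit, word, length) buckets with per-word slices by one flat word-to-digit map scanned linearly against a single five-character window sliced once (line[i:][:5]) and tested with startswith.
-- intended difference: When i = -len(word) with that number-word a suffix of line and 0 <= n, A returns None because its slice line[i:i+length] ends at absolute index 0 and is empty, while B returns the word's digit, the intended value since the word does start at position i. — e.g. on calc("one", -3, 0): A returns none, B returns some "1"
import Mathlib
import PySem

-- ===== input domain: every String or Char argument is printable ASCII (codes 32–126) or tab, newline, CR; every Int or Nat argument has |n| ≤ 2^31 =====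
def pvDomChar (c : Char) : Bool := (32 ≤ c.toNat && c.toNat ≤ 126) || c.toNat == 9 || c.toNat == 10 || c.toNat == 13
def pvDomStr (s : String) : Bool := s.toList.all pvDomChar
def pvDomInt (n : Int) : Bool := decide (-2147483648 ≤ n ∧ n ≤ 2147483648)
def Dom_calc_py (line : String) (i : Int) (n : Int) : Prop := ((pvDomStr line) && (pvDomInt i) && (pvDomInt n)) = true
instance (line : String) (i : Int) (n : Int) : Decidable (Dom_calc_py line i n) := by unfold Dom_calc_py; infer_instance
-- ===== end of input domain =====

-- B slices one five-character window at i and matches it with startswith over a flat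
-- word→digit map, instead of A's per-word slices dispatched through a first-letter dict
-- (objective: simpler). On the D_ corner (i = -len(word), that word a suffix of line,
-- 0 ≤ n) A's slice line[i:i+length] has stop 0 and is empty, so A misses the word and
-- returns None; B returns the word's digit.

-- ===== PORT A =====
-- the module-level dict 'nums'; words stored as List Char (Python str equality = code-point list equality)
def numsA : PySem.Dict Char (List (String × List Char × Int)) :=
  PySem.Dict.mk
    [ ('o', [("1", ['o','n','e'], 3)])
    , ('t', [("2", ['t','w','o'], 3), ("3", ['t','h','r','e','e'], 5)])
    , ('f', [("4", ['f','o','u','r'], 4), ("5", ['f','i','v','e'], 4)])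
    , ('s', [("6", ['s','i','x'], 3), ("7", ['s','e','v','e','n'], 5)])
    , ('e', [("8", ['e','i','g','h','t'], 5)])
    , ('n', [("9", ['n','i','n','e'], 4)]) ]

-- the 'for digit, number, length in nums[char]' loop with its early returns
def calcLoopA (s : List Char) (i n : Int) : List (String × List Char × Int) → Option String
  | [] => none
  | (digit, number, length) :: rest =>
    if i + length - 1 < n then
      if PySem.List.slice s (some i) (some (i + length)) = number then some digit
      else calcLoopA s i n rest
    else calcLoopA s i n rest

def calc_py (line : String) (i : Int) (n : Int) : Option String :=
  match PySem.List.pyGet? line.toList i with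
  | none => none  -- line[i] raises IndexError: excluded by Pre_calc_py
  | some char =>
    -- char.isnumeric(): on the printable-ASCII domain this is exactly isdigit
    if PySem.Chars.isdigit char then some (String.singleton char)
    else
      match numsA.get? char with
      | some bucket => calcLoopA line.toList i n bucket
      | none => none

-- ===== PORT B =====
-- the flat WORDS dict of Source B, iterated in insertion order
def wordsB : List (List Char × String) :=
  [ (['o','n','e'], "1"), (['t','w','o'], "2"), (['t','h','r','e','e'], "3")
  , (['f','o','u','r'], "4"), (['f','i','v','e'], "5"), (['s','i','x'], "6")
  , (['s','e','v','e','n'], "7"), (['e','i','g','h','t'], "8"), (['n','i','n','e'], "9") ]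

def calc_py_alt (line : String) (i : Int) (n : Int) : Option String :=
  match PySem.List.pyGet? line.toList i with
  | none => none  -- line[i] raises IndexError: excluded by Pre_calc_py
  | some char =>
    if PySem.Chars.isdigit char then some (String.singleton char)
    else
      -- window = line[i:][:5]; the for-loop with its early return is the first find?
      let window := PySem.List.slice (PySem.List.slice line.toList (some i) none) none (some 5)
      (wordsB.find? (fun wd =>
        decide (i + (wd.1.length : Int) ≤ n) && wd.1.isPrefixOf window)).map (·.2)

-- ===== PRECONDITION & SPEC =====
-- Pre_ excludes exactly the inputs where Python A raises IndexError on line[i].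
def Pre_calc_py (line : String) (i : Int) (n : Int) : Prop :=
  PySem.Raise.InRange line.toList.length i
instance (line : String) (i : Int) (n : Int) : Decidable (Pre_calc_py line i n) := by
  unfold Pre_calc_py; infer_instance

def pvWitness_calc_py : String × Int × Int := ("xtwo1", 1, 5)

-- On i = -len(word) with that number-word a suffix of line and 0 ≤ n, A returns None —
-- its slice line[i:i+length] ends at absolute index 0 and is empty, so the comparison
-- always fails — while B returns the word's digit, the intended value since the word
-- does start at position i.
def D_calc_py (line : String) (i : Int) (n : Int) : Prop :=
  0 ≤ n ∧
  ( (i = -3 ∧ (PySem.Str.endswith line "one" = true ∨ PySem.Str.endswith line "two" = true ∨ PySem.Str.endswith line "six" = true))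
  ∨ (i = -4 ∧ (PySem.Str.endswith line "four" = true ∨ PySem.Str.endswith line "five" = true ∨ PySem.Str.endswith line "nine" = true))
  ∨ (i = -5 ∧ (PySem.Str.endswith line "three" = true ∨ PySem.Str.endswith line "seven" = true ∨ PySem.Str.endswith line "eight" = true)) )
instance (line : String) (i : Int) (n : Int) : Decidable (D_calc_py line i n) := by
  unfold D_calc_py; infer_instance

def Spec_calc_py (line : String) (i : Int) (n : Int) (out : Option String) : Prop := ¬ D_calc_py line i n → out = calc_py_alt line i n
instance (line : String) (i : Int) (n : Int) (out : Option String) : Decidable (Spec_calc_py line i n out) := by unfold Spec_calc_py; infer_instance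

def pvDiffWitness_calc_py : String × Int × Int := ("one", -3, 0)
def pvDiffWitnessOut_calc_py : (Option String) × (Option String) := (none, some "1")

-- ===== CLAIM (what is proved, stated in full; the proofs are below) =====
def Claim_unchanged_calc_py : Prop := ∀ (line : String) (i : Int) (n : Int), Dom_calc_py line i n → Pre_calc_py line i n → Spec_calc_py line i n (calc_py line i n)
def Claim_changed_calc_py : Prop := Dom_calc_py (pvDiffWitness_calc_py.1) (pvDiffWitness_calc_py.2.1) (pvDiffWitness_calc_py.2.2) ∧ Pre_calc_py (pvDiffWitness_calc_py.1) (pvDiffWitness_calc_py.2.1) (pvDiffWitness_calc_py.2.2) ∧ D_calc_py (pvDiffWitness_calc_py.1) (pvDiffWitness_calc_py.2.1) (pvDiffWitness_calc_py.2.2) ∧ calc_py (pvDiffWitness_calc_py.1) (pvDiffWitness_calc_py.2.1) (pvDiffWitness_calc_py.2.2) = pvDiffWitnessOut_calc_py.1 ∧ calc_py_alt (pvDiffWitness_calc_py.1) (pvDiffWitness_calc_py.2.1) (pvDiffWitness_calc_py.2.2) = pvDiffWitnessOut_calc_py.2 ∧ pvDiffWitnessOut_calc_py.1 ≠ pvD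iffWitnessOut_calc_py.2

def Claim_exact_calc_py : Prop := ∀ (line : String) (i : Int) (n : Int), Dom_calc_py line i n → Pre_calc_py line i n → D_calc_py line i n → calc_py line i n ≠ calc_py_alt line i n

-- ===== LEMMAS AND PROOFS =====

-- a prefix of the right length is exactly the corresponding take
theorem take_len_eq_iff_prefix (w d : List Char) :
    (List.take w.length d = w) ↔ w <+: d :=
  ⟨fun h => List.prefix_iff_eq_take.mpr h.symm, fun h => (List.prefix_iff_eq_take.mp h).symm⟩

-- B's window line[i:][:5] as take/drop of the clamped start index
theorem window_eq (s : List Char) (i : Int) :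
    PySem.List.slice (PySem.List.slice s (some i) none) none (some 5) =
    List.take 5 (List.drop (PySem.List.clampIdx s.length i) s) := by
  rw [PySem.List.slice_some_none]
  exact PySem.List.slice_to_natCast (s.drop (PySem.List.clampIdx s.length i)) 5

-- A successful s[i] lookup is the element at the clamped (slice-style) index.
theorem getElem?_clamp_of_pyGet? (s : List Char) (i : Int) (c : Char)
    (hc : PySem.List.pyGet? s i = some c) :
    s[PySem.List.clampIdx s.length i]? = some c := by
  unfold PySem.List.pyGet? PySem.List.pyIdx? at hc
  unfold PySem.List.clampIdx
  by_cases h1 : 0 ≤ i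
  · rw [if_pos h1] at hc
    by_cases h2 : i < (s.length : Int)
    · rw [if_pos h2] at hc
      simp only [Option.bind] at hc
      rw [if_neg (by omega : ¬ i < 0), (by omega : min i.toNat s.length = i.toNat)]
      exact hc
    · rw [if_neg h2] at hc; simp at hc
  · rw [if_neg h1] at hc
    by_cases h3 : -(s.length : Int) ≤ i
    · rw [if_pos h3] at hc
      simp only [Option.bind] at hc
      rw [if_pos (by omega : i < 0), if_neg (by omega : ¬ ((s.length : Int) + i < 0)),
          (by omega : ((s.length : Int) + i).toNat = s.length - (-i).toNat)]
      exact hc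
    · rw [if_neg h3] at hc; simp at hc

-- a word whose first letter differs from line[i] is never a prefix of the window
theorem not_prefix_of_head_ne (s : List Char) (i : Int) (c : Char) (w : List Char)
    (hc : PySem.List.pyGet? s i = some c) (hne : w ≠ []) (hh : w.head? ≠ some c) :
    w.isPrefixOf (List.take 5 (List.drop (PySem.List.clampIdx s.length i) s)) = false := by
  have hidx := getElem?_clamp_of_pyGet? s i c hc
  rw [Bool.eq_false_iff]
  intro hp
  obtain ⟨t, ht⟩ := List.isPrefixOf_iff_prefix.mp hp
  apply hh
  have hwh : (List.take 5 (List.drop (PySem.List.clampIdx s.length i) s)).head? = w.head? := by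
    rw [← ht, List.head?_append_of_ne_nil _ hne]
  rw [← hwh, List.head?_take, List.head?_drop]
  simp [hidx]

-- a suffix of the character list is endswith on the original string
theorem endswith_of_isSuffixOf (line : String) (s w : List Char) (p : String)
    (hs : line.toList = s) (hpw : p.toList = w) (h : w.isSuffixOf s = true) :
    PySem.Str.endswith line p = true := by
  rw [PySem.Str.endswith_eq, hs, hpw]
  exact (PySem.Chars.endswith_iff _ _).mpr (List.isSuffixOf_iff_suffix.mp h)

-- the per-word condition: A's bound-and-slice test equals B's bound-and-prefix test,
-- outside the D_ corner of that word
theorem cond_iff (s : List Char) (i n : Int) (w : List Char) (L : Int)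
    (hLw : (w.length : Int) = L)
    (hpre : -(s.length : Int) ≤ i ∧ i < (s.length : Int))
    (h3 : 3 ≤ w.length) (h5 : w.length ≤ 5)
    (hD : ¬ (0 ≤ n ∧ i = -L ∧ w.isSuffixOf s = true)) :
    ((i + L - 1 < n ∧ PySem.List.slice s (some i) (some (i + L)) = w)
      ↔ (i + L ≤ n ∧
         w.isPrefixOf (List.take 5 (List.drop (PySem.List.clampIdx s.length i) s)) = true)) := by
  subst hLw
  have hb : (i + (w.length : Int) - 1 < n) ↔ (i + (w.length : Int) ≤ n) := by omega
  obtain ⟨hp1, hp2⟩ := hpre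
  have hBiff : (w.isPrefixOf (List.take 5 (List.drop (PySem.List.clampIdx s.length i) s)) = true)
      ↔ w <+: List.drop (PySem.List.clampIdx s.length i) s := by
    rw [List.isPrefixOf_iff_prefix, List.prefix_take_iff]
    exact ⟨fun h => h.1, fun h => ⟨h, by omega⟩⟩
  have hAeq : PySem.List.slice s (some i) (some (i + (w.length : Int))) =
      List.take (PySem.List.clampIdx s.length (i + (w.length : Int)) - PySem.List.clampIdx s.length i)
        (List.drop (PySem.List.clampIdx s.length i) s) := by
    simp [PySem.List.slice]
  by_cases hi : 0 ≤ i
  · -- 0 ≤ i < len: both tests are "take w.length of the tail equals w"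
    have hci : PySem.List.clampIdx s.length i = i.toNat := by
      unfold PySem.List.clampIdx; split_ifs <;> omega
    have hcL : PySem.List.clampIdx s.length (i + (w.length : Int)) =
        min (i + (w.length : Int)).toNat s.length := by
      unfold PySem.List.clampIdx; split_ifs <;> omega
    rw [hci] at hBiff
    rw [hAeq, hcL, hci]
    have hdlen : (List.drop i.toNat s).length = s.length - i.toNat := by simp
    have htake : List.take (min (i + (w.length : Int)).toNat s.length - i.toNat)
        (List.drop i.toNat s) = List.take w.length (List.drop i.toNat s) := by
      rcases le_total w.length (List.drop i.toNat s).length with h | h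
      · rw [(by omega : min (i + (w.length : Int)).toNat s.length - i.toNat = w.length)]
      · rw [(by omega :
            min (i + (w.length : Int)).toNat s.length - i.toNat = (List.drop i.toNat s).length),
          List.take_length, List.take_of_length_le h]
    rw [htake, take_len_eq_iff_prefix, ← hBiff, hb]
  · -- i < 0
    have hci : PySem.List.clampIdx s.length i = s.length - (-i).toNat := by
      unfold PySem.List.clampIdx; split_ifs <;> omega
    have hdlen : (List.drop (s.length - (-i).toNat) s).length = (-i).toNat := by simp; omega
    rw [hci] at hBiff
    rw [hAeq, hci]
    rcases lt_trichotomy (i + (w.length : Int)) 0 with hiL | hiL | hiL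
    · -- i + L < 0: the slice is exactly take L of the tail
      have hcL : PySem.List.clampIdx s.length (i + (w.length : Int)) =
          s.length - (-(i + (w.length : Int))).toNat := by
        unfold PySem.List.clampIdx; split_ifs <;> omega
      rw [hcL,
        (by omega : s.length - (-(i + (w.length : Int))).toNat - (s.length - (-i).toNat) = w.length),
        take_len_eq_iff_prefix, ← hBiff, hb]
    · -- i + L = 0: A's slice is empty; B matching here is exactly the D_ corner
      have hcL : PySem.List.clampIdx s.length (i + (w.length : Int)) = 0 := by
        unfold PySem.List.clampIdx; split_ifs <;> omega
      rw [hcL, (by omega : 0 - (s.length - (-i).toNat) = 0), List.take_zero]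
      constructor
      · rintro ⟨-, h2⟩
        exact absurd (congrArg List.length h2) (by simp; omega)
      · rintro ⟨h1, h2⟩
        exfalso; apply hD
        have hw := hBiff.mp h2
        have hweq : w = List.drop (s.length - (-i).toNat) s :=
          hw.eq_of_length (by rw [hdlen]; omega)
        exact ⟨by omega, by omega,
          by rw [List.isSuffixOf_iff_suffix, hweq]; exact List.drop_suffix _ s⟩
    · -- i < 0 < i + L: the tail is shorter than the word; both tests fail
      constructor
      · rintro ⟨-, h2⟩
        exfalso
        have hlen := congrArg List.length h2
        rw [List.length_take, List.length_drop] at hlen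
        omega
      · rintro ⟨-, h2⟩
        exfalso
        have := (hBiff.mp h2).length_le
        rw [hdlen] at this
        omega

-- B's find?-then-project on a cons
theorem findB_cons (p : List Char × String → Bool) (a : List Char × String)
    (l : List (List Char × String)) :
    ((a :: l).find? p).map (·.2) =
      if p a = true then some a.2 else (l.find? p).map (·.2) := by
  by_cases h : p a = true
  · rw [List.find?_cons_of_pos h, if_pos h]; rfl
  · rw [List.find?_cons_of_neg (by simpa using h), if_neg h]

-- fusing A's guard-then-match nested ifs into B's single conjunction
theorem ite_nest {α : Type} (b m p : Prop) [Decidable b] [Decidable m] [Decidable p]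
    (x y : α) (h : b → (m ↔ p)) :
    (if b then (if m then x else y) else y) = if b ∧ p then x else y := by
  by_cases hb : b
  · by_cases hm : m
    · rw [if_pos hb, if_pos hm, if_pos ⟨hb, (h hb).mp hm⟩]
    · rw [if_pos hb, if_neg hm, if_neg (fun hc => hm ((h hb).mpr hc.2))]
  · rw [if_neg hb, if_neg (fun hc => hb hc.1)]

-- the full case analysis: A and B agree outside D_
theorem calc_agree (line : String) (i n : Int)
    (hpre : Pre_calc_py line i n) (hnD : ¬ D_calc_py line i n) :
    calc_py line i n = calc_py_alt line i n := by
  unfold Pre_calc_py PySem.Raise.InRange at hpre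
  unfold D_calc_py at hnD
  unfold calc_py calc_py_alt
  cases hg : PySem.List.pyGet? line.toList i with
  | none => simp
  | some c =>
    by_cases hd : PySem.Chars.isdigit c
    · simp [hd]
    · simp only [hd, if_false, Bool.false_eq_true, window_eq]
      generalize hs : line.toList = s at hg hpre
      have hpre' : -(s.length : Int) ≤ i ∧ i < (s.length : Int) := hpre
      have e1 := cond_iff s i n ['o','n','e'] 3 (by simp) hpre' (by decide) (by decide)
        (by rintro ⟨h0, h1, h2⟩
            exact hnD ⟨h0, Or.inl ⟨h1, Or.inl (endswith_of_isSuffixOf line s _ "one" hs (by decide) h2)⟩⟩)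
      have e2 := cond_iff s i n ['t','w','o'] 3 (by simp) hpre' (by decide) (by decide)
        (by rintro ⟨h0, h1, h2⟩
            exact hnD ⟨h0, Or.inl ⟨h1, Or.inr (Or.inl (endswith_of_isSuffixOf line s _ "two" hs (by decide) h2))⟩⟩)
      have e3 := cond_iff s i n ['t','h','r','e','e'] 5 (by simp) hpre' (by decide) (by decide)
        (by rintro ⟨h0, h1, h2⟩
            exact hnD ⟨h0, Or.inr (Or.inr ⟨h1, Or.inl (endswith_of_isSuffixOf line s _ "three" hs (by decide) h2)⟩)⟩)
      have e4 := cond_iff s i n ['f','o','u','r'] 4 (by simp) hpre' (by decide) (by decide)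
        (by rintro ⟨h0, h1, h2⟩
            exact hnD ⟨h0, Or.inr (Or.inl ⟨h1, Or.inl (endswith_of_isSuffixOf line s _ "four" hs (by decide) h2)⟩)⟩)
      have e5 := cond_iff s i n ['f','i','v','e'] 4 (by simp) hpre' (by decide) (by decide)
        (by rintro ⟨h0, h1, h2⟩
            exact hnD ⟨h0, Or.inr (Or.inl ⟨h1, Or.inr (Or.inl (endswith_of_isSuffixOf line s _ "five" hs (by decide) h2))⟩)⟩)
      have e6 := cond_iff s i n ['s','i','x'] 3 (by simp) hpre' (by decide) (by decide)
        (by rintro ⟨h0, h1, h2⟩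
            exact hnD ⟨h0, Or.inl ⟨h1, Or.inr (Or.inr (endswith_of_isSuffixOf line s _ "six" hs (by decide) h2))⟩⟩)
      have e7 := cond_iff s i n ['s','e','v','e','n'] 5 (by simp) hpre' (by decide) (by decide)
        (by rintro ⟨h0, h1, h2⟩
            exact hnD ⟨h0, Or.inr (Or.inr ⟨h1, Or.inr (Or.inl (endswith_of_isSuffixOf line s _ "seven" hs (by decide) h2))⟩)⟩)
      have e8 := cond_iff s i n ['e','i','g','h','t'] 5 (by simp) hpre' (by decide) (by decide)
        (by rintro ⟨h0, h1, h2⟩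
            exact hnD ⟨h0, Or.inr (Or.inr ⟨h1, Or.inr (Or.inr (endswith_of_isSuffixOf line s _ "eight" hs (by decide) h2))⟩)⟩)
      have e9 := cond_iff s i n ['n','i','n','e'] 4 (by simp) hpre' (by decide) (by decide)
        (by rintro ⟨h0, h1, h2⟩
            exact hnD ⟨h0, Or.inr (Or.inl ⟨h1, Or.inr (Or.inr (endswith_of_isSuffixOf line s _ "nine" hs (by decide) h2))⟩)⟩)
      by_cases h1 : c = 'o'
      · subst h1
        have t2 := not_prefix_of_head_ne s i 'o' ['t','w','o'] hg (by decide) (by decide)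
        have t3 := not_prefix_of_head_ne s i 'o' ['t','h','r','e','e'] hg (by decide) (by decide)
        have t4 := not_prefix_of_head_ne s i 'o' ['f','o','u','r'] hg (by decide) (by decide)
        have t5 := not_prefix_of_head_ne s i 'o' ['f','i','v','e'] hg (by decide) (by decide)
        have t6 := not_prefix_of_head_ne s i 'o' ['s','i','x'] hg (by decide) (by decide)
        have t7 := not_prefix_of_head_ne s i 'o' ['s','e','v','e','n'] hg (by decide) (by decide)
        have t8 := not_prefix_of_head_ne s i 'o' ['e','i','g','h','t'] hg (by decide) (by decide)
        have t9 := not_prefix_of_head_ne s i 'o' ['n','i','n','e'] hg (by decide) (by decide)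
        simp [numsA, PySem.Dict.get?_mk_cons, wordsB, calcLoopA, findB_cons,
              t2, t3, t4, t5, t6, t7, t8, t9]
        rw [ite_nest (i + 3 ≤ n) (PySem.List.slice s (some i) (some (i + 3)) = ['o','n','e'])
              (['o','n','e'] <+: List.take 5 (List.drop (PySem.List.clampIdx s.length i) s))
              (some "1") none
              (fun hb => ⟨fun hm => List.isPrefixOf_iff_prefix.mp (e1.mp ⟨by omega, hm⟩).2,
                fun hp => (e1.mpr ⟨hb, List.isPrefixOf_iff_prefix.mpr hp⟩).2⟩)]
      · by_cases h2 : c = 't'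
        · subst h2
          have t1 := not_prefix_of_head_ne s i 't' ['o','n','e'] hg (by decide) (by decide)
          have t4 := not_prefix_of_head_ne s i 't' ['f','o','u','r'] hg (by decide) (by decide)
          have t5 := not_prefix_of_head_ne s i 't' ['f','i','v','e'] hg (by decide) (by decide)
          have t6 := not_prefix_of_head_ne s i 't' ['s','i','x'] hg (by decide) (by decide)
          have t7 := not_prefix_of_head_ne s i 't' ['s','e','v','e','n'] hg (by decide) (by decide)
          have t8 := not_prefix_of_head_ne s i 't' ['e','i','g','h','t'] hg (by decide) (by decide)
          have t9 := not_prefix_of_head_ne s i 't' ['n','i','n','e'] hg (by decide) (by decide)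
          simp [numsA, PySem.Dict.get?_mk_cons, wordsB, calcLoopA, findB_cons,
                t1, t4, t5, t6, t7, t8, t9]
          rw [ite_nest (i + 5 ≤ n) (PySem.List.slice s (some i) (some (i + 5)) = ['t','h','r','e','e'])
                (['t','h','r','e','e'] <+: List.take 5 (List.drop (PySem.List.clampIdx s.length i) s))
                (some "3") none
                (fun hb => ⟨fun hm => List.isPrefixOf_iff_prefix.mp (e3.mp ⟨by omega, hm⟩).2,
                  fun hp => (e3.mpr ⟨hb, List.isPrefixOf_iff_prefix.mpr hp⟩).2⟩)]
          rw [ite_nest (i + 3 ≤ n) (PySem.List.slice s (some i) (some (i + 3)) = ['t','w','o'])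
                (['t','w','o'] <+: List.take 5 (List.drop (PySem.List.clampIdx s.length i) s))
                (some "2") (if i + 5 ≤ n ∧ ['t', 'h', 'r', 'e', 'e'] <+: List.take 5 (List.drop (PySem.List.clampIdx s.length i) s) then some "3" else none)
                (fun hb => ⟨fun hm => List.isPrefixOf_iff_prefix.mp (e2.mp ⟨by omega, hm⟩).2,
                  fun hp => (e2.mpr ⟨hb, List.isPrefixOf_iff_prefix.mpr hp⟩).2⟩)]
        · by_cases h3 : c = 'f'
          · subst h3
            have t1 := not_prefix_of_head_ne s i 'f' ['o','n','e'] hg (by decide) (by decide)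
            have t2 := not_prefix_of_head_ne s i 'f' ['t','w','o'] hg (by decide) (by decide)
            have t3 := not_prefix_of_head_ne s i 'f' ['t','h','r','e','e'] hg (by decide) (by decide)
            have t6 := not_prefix_of_head_ne s i 'f' ['s','i','x'] hg (by decide) (by decide)
            have t7 := not_prefix_of_head_ne s i 'f' ['s','e','v','e','n'] hg (by decide) (by decide)
            have t8 := not_prefix_of_head_ne s i 'f' ['e','i','g','h','t'] hg (by decide) (by decide)
            have t9 := not_prefix_of_head_ne s i 'f' ['n','i','n','e'] hg (by decide) (by decide)
            simp [numsA, PySem.Dict.get?_mk_cons, wordsB, calcLoopA, findB_cons,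
                  t1, t2, t3, t6, t7, t8, t9]
            rw [ite_nest (i + 4 ≤ n) (PySem.List.slice s (some i) (some (i + 4)) = ['f','i','v','e'])
                  (['f','i','v','e'] <+: List.take 5 (List.drop (PySem.List.clampIdx s.length i) s))
                  (some "5") none
                  (fun hb => ⟨fun hm => List.isPrefixOf_iff_prefix.mp (e5.mp ⟨by omega, hm⟩).2,
                    fun hp => (e5.mpr ⟨hb, List.isPrefixOf_iff_prefix.mpr hp⟩).2⟩)]
            rw [ite_nest (i + 4 ≤ n) (PySem.List.slice s (some i) (some (i + 4)) = ['f','o','u','r'])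
                  (['f','o','u','r'] <+: List.take 5 (List.drop (PySem.List.clampIdx s.length i) s))
                  (some "4") (if i + 4 ≤ n ∧ ['f', 'i', 'v', 'e'] <+: List.take 5 (List.drop (PySem.List.clampIdx s.length i) s) then some "5" else none)
                  (fun hb => ⟨fun hm => List.isPrefixOf_iff_prefix.mp (e4.mp ⟨by omega, hm⟩).2,
                    fun hp => (e4.mpr ⟨hb, List.isPrefixOf_iff_prefix.mpr hp⟩).2⟩)]
          · by_cases h4 : c = 's'
            · subst h4
              have t1 := not_prefix_of_head_ne s i 's' ['o','n','e'] hg (by decide) (by decide)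
              have t2 := not_prefix_of_head_ne s i 's' ['t','w','o'] hg (by decide) (by decide)
              have t3 := not_prefix_of_head_ne s i 's' ['t','h','r','e','e'] hg (by decide) (by decide)
              have t4 := not_prefix_of_head_ne s i 's' ['f','o','u','r'] hg (by decide) (by decide)
              have t5 := not_prefix_of_head_ne s i 's' ['f','i','v','e'] hg (by decide) (by decide)
              have t8 := not_prefix_of_head_ne s i 's' ['e','i','g','h','t'] hg (by decide) (by decide)
              have t9 := not_prefix_of_head_ne s i 's' ['n','i','n','e'] hg (by decide) (by decide)
              simp [numsA, PySem.Dict.get?_mk_cons, wordsB, calcLoopA, findB_cons,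
                    t1, t2, t3, t4, t5, t8, t9]
              rw [ite_nest (i + 5 ≤ n) (PySem.List.slice s (some i) (some (i + 5)) = ['s','e','v','e','n'])
                    (['s','e','v','e','n'] <+: List.take 5 (List.drop (PySem.List.clampIdx s.length i) s))
                    (some "7") none
                    (fun hb => ⟨fun hm => List.isPrefixOf_iff_prefix.mp (e7.mp ⟨by omega, hm⟩).2,
                      fun hp => (e7.mpr ⟨hb, List.isPrefixOf_iff_prefix.mpr hp⟩).2⟩)]
              rw [ite_nest (i + 3 ≤ n) (PySem.List.slice s (some i) (some (i + 3)) = ['s','i','x'])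
                    (['s','i','x'] <+: List.take 5 (List.drop (PySem.List.clampIdx s.length i) s))
                    (some "6") (if i + 5 ≤ n ∧ ['s', 'e', 'v', 'e', 'n'] <+: List.take 5 (List.drop (PySem.List.clampIdx s.length i) s) then some "7" else none)
                    (fun hb => ⟨fun hm => List.isPrefixOf_iff_prefix.mp (e6.mp ⟨by omega, hm⟩).2,
                      fun hp => (e6.mpr ⟨hb, List.isPrefixOf_iff_prefix.mpr hp⟩).2⟩)]
            · by_cases h5 : c = 'e'
              · subst h5
                have t1 := not_prefix_of_head_ne s i 'e' ['o','n','e'] hg (by decide) (by decide)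
                have t2 := not_prefix_of_head_ne s i 'e' ['t','w','o'] hg (by decide) (by decide)
                have t3 := not_prefix_of_head_ne s i 'e' ['t','h','r','e','e'] hg (by decide) (by decide)
                have t4 := not_prefix_of_head_ne s i 'e' ['f','o','u','r'] hg (by decide) (by decide)
                have t5 := not_prefix_of_head_ne s i 'e' ['f','i','v','e'] hg (by decide) (by decide)
                have t6 := not_prefix_of_head_ne s i 'e' ['s','i','x'] hg (by decide) (by decide)
                have t7 := not_prefix_of_head_ne s i 'e' ['s','e','v','e','n'] hg (by decide) (by decide)
                have t9 := not_prefix_of_head_ne s i 'e' ['n','i','n','e'] hg (by decide) (by decide)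
                simp [numsA, PySem.Dict.get?_mk_cons, wordsB, calcLoopA, findB_cons,
                      t1, t2, t3, t4, t5, t6, t7, t9]
                rw [ite_nest (i + 5 ≤ n) (PySem.List.slice s (some i) (some (i + 5)) = ['e','i','g','h','t'])
                      (['e','i','g','h','t'] <+: List.take 5 (List.drop (PySem.List.clampIdx s.length i) s))
                      (some "8") none
                      (fun hb => ⟨fun hm => List.isPrefixOf_iff_prefix.mp (e8.mp ⟨by omega, hm⟩).2,
                        fun hp => (e8.mpr ⟨hb, List.isPrefixOf_iff_prefix.mpr hp⟩).2⟩)]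
              · by_cases h6 : c = 'n'
                · subst h6
                  have t1 := not_prefix_of_head_ne s i 'n' ['o','n','e'] hg (by decide) (by decide)
                  have t2 := not_prefix_of_head_ne s i 'n' ['t','w','o'] hg (by decide) (by decide)
                  have t3 := not_prefix_of_head_ne s i 'n' ['t','h','r','e','e'] hg (by decide) (by decide)
                  have t4 := not_prefix_of_head_ne s i 'n' ['f','o','u','r'] hg (by decide) (by decide)
                  have t5 := not_prefix_of_head_ne s i 'n' ['f','i','v','e'] hg (by decide) (by decide)
                  have t6 := not_prefix_of_head_ne s i 'n' ['s','i','x'] hg (by decide) (by decide)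
                  have t7 := not_prefix_of_head_ne s i 'n' ['s','e','v','e','n'] hg (by decide) (by decide)
                  have t8 := not_prefix_of_head_ne s i 'n' ['e','i','g','h','t'] hg (by decide) (by decide)
                  simp [numsA, PySem.Dict.get?_mk_cons, wordsB, calcLoopA,
                        t1, t2, t3, t4, t5, t6, t7, t8]
                  rw [ite_nest (i + 4 ≤ n) (PySem.List.slice s (some i) (some (i + 4)) = ['n','i','n','e'])
                        (['n','i','n','e'] <+: List.take 5 (List.drop (PySem.List.clampIdx s.length i) s))
                        (some "9") none
                        (fun hb => ⟨fun hm => List.isPrefixOf_iff_prefix.mp (e9.mp ⟨by omega, hm⟩).2,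
                          fun hp => (e9.mpr ⟨hb, List.isPrefixOf_iff_prefix.mpr hp⟩).2⟩)]
                · have t1 := not_prefix_of_head_ne s i c ['o','n','e'] hg (by decide)
                    (by simp only [List.head?_cons, ne_eq, Option.some.injEq]; exact fun h => h1 h.symm)
                  have t2 := not_prefix_of_head_ne s i c ['t','w','o'] hg (by decide)
                    (by simp only [List.head?_cons, ne_eq, Option.some.injEq]; exact fun h => h2 h.symm)
                  have t3 := not_prefix_of_head_ne s i c ['t','h','r','e','e'] hg (by decide)
                    (by simp only [List.head?_cons, ne_eq, Option.some.injEq]; exact fun h => h2 h.symm)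
                  have t4 := not_prefix_of_head_ne s i c ['f','o','u','r'] hg (by decide)
                    (by simp only [List.head?_cons, ne_eq, Option.some.injEq]; exact fun h => h3 h.symm)
                  have t5 := not_prefix_of_head_ne s i c ['f','i','v','e'] hg (by decide)
                    (by simp only [List.head?_cons, ne_eq, Option.some.injEq]; exact fun h => h3 h.symm)
                  have t6 := not_prefix_of_head_ne s i c ['s','i','x'] hg (by decide)
                    (by simp only [List.head?_cons, ne_eq, Option.some.injEq]; exact fun h => h4 h.symm)
                  have t7 := not_prefix_of_head_ne s i c ['s','e','v','e','n'] hg (by decide)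
                    (by simp only [List.head?_cons, ne_eq, Option.some.injEq]; exact fun h => h4 h.symm)
                  have t8 := not_prefix_of_head_ne s i c ['e','i','g','h','t'] hg (by decide)
                    (by simp only [List.head?_cons, ne_eq, Option.some.injEq]; exact fun h => h5 h.symm)
                  have t9 := not_prefix_of_head_ne s i c ['n','i','n','e'] hg (by decide)
                    (by simp only [List.head?_cons, ne_eq, Option.some.injEq]; exact fun h => h6 h.symm)
                  have u1 : ¬ (('o' : Char) = c) := fun h => h1 h.symm
                  have u2 : ¬ (('t' : Char) = c) := fun h => h2 h.symm
                  have u3 : ¬ (('f' : Char) = c) := fun h => h3 h.symm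
                  have u4 : ¬ (('s' : Char) = c) := fun h => h4 h.symm
                  have u5 : ¬ (('e' : Char) = c) := fun h => h5 h.symm
                  have u6 : ¬ (('n' : Char) = c) := fun h => h6 h.symm
                  simp [numsA, PySem.Dict.get?, wordsB,
                        u1, u2, u3, u4, u5, u6, t1, t2, t3, t4, t5, t6, t7, t8, t9]

-- a slice with stop 0 is empty, wherever it starts
theorem slice_to_zero (s : List Char) (a : Int) :
    PySem.List.slice s (some a) (some 0) = [] := by
  simp [PySem.List.slice, PySem.List.clampIdx]

-- a slice starting at the in-range negative index a has fewer than -a elements past it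
theorem slice_ne_short (s : List Char) (a b : Int) (w' : List Char)
    (ha1 : -(s.length : Int) ≤ a) (ha2 : a < 0) (hlen : -a < (w'.length : Int)) :
    PySem.List.slice s (some a) (some b) ≠ w' := by
  intro h
  have hl := congrArg List.length h
  rw [PySem.List.length_slice] at hl
  have h1 : PySem.List.clampIdx s.length a = ((s.length : Int) + a).toNat := by
    unfold PySem.List.clampIdx; split_ifs <;> omega
  have h2 : PySem.List.clampIdx s.length b ≤ s.length := by
    unfold PySem.List.clampIdx; split_ifs <;> omega
  omega

theorem tight_all (line : String) (i n : Int)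
    (hpre : Pre_calc_py line i n) (hD : D_calc_py line i n) :
    calc_py line i n ≠ calc_py_alt line i n := by
  unfold Pre_calc_py PySem.Raise.InRange at hpre
  unfold D_calc_py at hD
  obtain ⟨hn, hD⟩ := hD
  unfold calc_py calc_py_alt
  rcases hD with ⟨hi, hw⟩ | ⟨hi, hw⟩ | ⟨hi, hw⟩ <;> subst hi
  · -- i = -3 : one / two / six
    rcases hw with h | h | h
    · -- target word "one" at i = -3
      rw [PySem.Str.endswith_eq] at h
      have hsuf : ['o','n','e'] <:+ line.toList := by
        have h2 := (PySem.Chars.endswith_iff _ _).mp h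
        rwa [(by decide : ("one" : String).toList = ['o','n','e'])] at h2
      generalize hs : line.toList = s at hsuf hpre ⊢
      obtain ⟨t, ht⟩ := hsuf
      have hlt : t.length + 3 = s.length := by rw [← ht]; simp
      have hdrop : List.drop (s.length - 3) s = ['o','n','e'] := by
        rw [← ht, (by simp : (t ++ ['o','n','e']).length - 3 = t.length), List.drop_left]
      have hg : PySem.List.pyGet? s (-3) = some 'o' := by
        rw [PySem.List.pyGet?_neg_ofNat s 3 (by norm_num) (by omega)]
        have h0 : (List.drop (s.length - 3) s)[0]? = some 'o' := by rw [hdrop]; rfl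
        rw [List.getElem?_drop] at h0
        simpa using h0
      simp only [hg]
      have hd0 : PySem.Chars.isdigit 'o' = false := by decide
      have ne1 : PySem.List.slice s (some (-3)) (some 0) ≠ ['o','n','e'] := by
        simp [slice_to_zero]
      have hci : PySem.List.clampIdx s.length (-3) = s.length - 3 := by
        unfold PySem.List.clampIdx; split_ifs <;> omega
      have hwin : PySem.List.slice (PySem.List.slice s (some (-3)) none) none (some 5) = ['o','n','e'] := by
        rw [window_eq, hci, hdrop]; exact List.take_of_length_le (by decide)
      have pT : List.isPrefixOf ['o','n','e'] ['o','n','e'] = true := by decide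
      simp [numsA, PySem.Dict.get?_mk_cons, calcLoopA, wordsB, hwin, pT, hn, hd0,
            ne1]
    · -- target word "two" at i = -3
      rw [PySem.Str.endswith_eq] at h
      have hsuf : ['t','w','o'] <:+ line.toList := by
        have h2 := (PySem.Chars.endswith_iff _ _).mp h
        rwa [(by decide : ("two" : String).toList = ['t','w','o'])] at h2
      generalize hs : line.toList = s at hsuf hpre ⊢
      obtain ⟨t, ht⟩ := hsuf
      have hlt : t.length + 3 = s.length := by rw [← ht]; simp
      have hdrop : List.drop (s.length - 3) s = ['t','w','o'] := by
        rw [← ht, (by simp : (t ++ ['t','w','o']).length - 3 = t.length), List.drop_left]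
      have hg : PySem.List.pyGet? s (-3) = some 't' := by
        rw [PySem.List.pyGet?_neg_ofNat s 3 (by norm_num) (by omega)]
        have h0 : (List.drop (s.length - 3) s)[0]? = some 't' := by rw [hdrop]; rfl
        rw [List.getElem?_drop] at h0
        simpa using h0
      simp only [hg]
      have hd0 : PySem.Chars.isdigit 't' = false := by decide
      have ne1 : PySem.List.slice s (some (-3)) (some 0) ≠ ['t','w','o'] := by
        simp [slice_to_zero]
      have ne2 : PySem.List.slice s (some (-3)) (some (2)) ≠ ['t','h','r','e','e'] := by
        exact slice_ne_short s (-3) (2) ['t','h','r','e','e'] (by omega) (by norm_num) (by norm_num)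
      have hci : PySem.List.clampIdx s.length (-3) = s.length - 3 := by
        unfold PySem.List.clampIdx; split_ifs <;> omega
      have hwin : PySem.List.slice (PySem.List.slice s (some (-3)) none) none (some 5) = ['t','w','o'] := by
        rw [window_eq, hci, hdrop]; exact List.take_of_length_le (by decide)
      have pf_one : List.isPrefixOf ['o','n','e'] ['t','w','o'] = false := by decide
      have pT : List.isPrefixOf ['t','w','o'] ['t','w','o'] = true := by decide
      simp [numsA, PySem.Dict.get?_mk_cons, calcLoopA, wordsB, hwin, pT, hn, hd0,
            ne1, ne2, pf_one]
    · -- target word "six" at i = -3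
      rw [PySem.Str.endswith_eq] at h
      have hsuf : ['s','i','x'] <:+ line.toList := by
        have h2 := (PySem.Chars.endswith_iff _ _).mp h
        rwa [(by decide : ("six" : String).toList = ['s','i','x'])] at h2
      generalize hs : line.toList = s at hsuf hpre ⊢
      obtain ⟨t, ht⟩ := hsuf
      have hlt : t.length + 3 = s.length := by rw [← ht]; simp
      have hdrop : List.drop (s.length - 3) s = ['s','i','x'] := by
        rw [← ht, (by simp : (t ++ ['s','i','x']).length - 3 = t.length), List.drop_left]
      have hg : PySem.List.pyGet? s (-3) = some 's' := by
        rw [PySem.List.pyGet?_neg_ofNat s 3 (by norm_num) (by omega)]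
        have h0 : (List.drop (s.length - 3) s)[0]? = some 's' := by rw [hdrop]; rfl
        rw [List.getElem?_drop] at h0
        simpa using h0
      simp only [hg]
      have hd0 : PySem.Chars.isdigit 's' = false := by decide
      have ne1 : PySem.List.slice s (some (-3)) (some 0) ≠ ['s','i','x'] := by
        simp [slice_to_zero]
      have ne2 : PySem.List.slice s (some (-3)) (some (2)) ≠ ['s','e','v','e','n'] := by
        exact slice_ne_short s (-3) (2) ['s','e','v','e','n'] (by omega) (by norm_num) (by norm_num)
      have hci : PySem.List.clampIdx s.length (-3) = s.length - 3 := by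
        unfold PySem.List.clampIdx; split_ifs <;> omega
      have hwin : PySem.List.slice (PySem.List.slice s (some (-3)) none) none (some 5) = ['s','i','x'] := by
        rw [window_eq, hci, hdrop]; exact List.take_of_length_le (by decide)
      have pf_one : List.isPrefixOf ['o','n','e'] ['s','i','x'] = false := by decide
      have pf_two : List.isPrefixOf ['t','w','o'] ['s','i','x'] = false := by decide
      have pf_three : List.isPrefixOf ['t','h','r','e','e'] ['s','i','x'] = false := by decide
      have pf_four : List.isPrefixOf ['f','o','u','r'] ['s','i','x'] = false := by decide
      have pf_five : List.isPrefixOf ['f','i','v','e'] ['s','i','x'] = false := by decide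
      have pT : List.isPrefixOf ['s','i','x'] ['s','i','x'] = true := by decide
      simp [numsA, PySem.Dict.get?_mk_cons, calcLoopA, wordsB, hwin, pT, hn, hd0,
            ne1, ne2, pf_one, pf_two, pf_three, pf_four, pf_five]
  · -- i = -4 : four / five / nine
    rcases hw with h | h | h
    · -- target word "four" at i = -4
      rw [PySem.Str.endswith_eq] at h
      have hsuf : ['f','o','u','r'] <:+ line.toList := by
        have h2 := (PySem.Chars.endswith_iff _ _).mp h
        rwa [(by decide : ("four" : String).toList = ['f','o','u','r'])] at h2
      generalize hs : line.toList = s at hsuf hpre ⊢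
      obtain ⟨t, ht⟩ := hsuf
      have hlt : t.length + 4 = s.length := by rw [← ht]; simp
      have hdrop : List.drop (s.length - 4) s = ['f','o','u','r'] := by
        rw [← ht, (by simp : (t ++ ['f','o','u','r']).length - 4 = t.length), List.drop_left]
      have hg : PySem.List.pyGet? s (-4) = some 'f' := by
        rw [PySem.List.pyGet?_neg_ofNat s 4 (by norm_num) (by omega)]
        have h0 : (List.drop (s.length - 4) s)[0]? = some 'f' := by rw [hdrop]; rfl
        rw [List.getElem?_drop] at h0
        simpa using h0
      simp only [hg]
      have hd0 : PySem.Chars.isdigit 'f' = false := by decide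
      have ne1 : PySem.List.slice s (some (-4)) (some 0) ≠ ['f','o','u','r'] := by
        simp [slice_to_zero]
      have ne2 : PySem.List.slice s (some (-4)) (some 0) ≠ ['f','i','v','e'] := by
        simp [slice_to_zero]
      have hci : PySem.List.clampIdx s.length (-4) = s.length - 4 := by
        unfold PySem.List.clampIdx; split_ifs <;> omega
      have hwin : PySem.List.slice (PySem.List.slice s (some (-4)) none) none (some 5) = ['f','o','u','r'] := by
        rw [window_eq, hci, hdrop]; exact List.take_of_length_le (by decide)
      have pf_one : List.isPrefixOf ['o','n','e'] ['f','o','u','r'] = false := by decide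
      have pf_two : List.isPrefixOf ['t','w','o'] ['f','o','u','r'] = false := by decide
      have pf_three : List.isPrefixOf ['t','h','r','e','e'] ['f','o','u','r'] = false := by decide
      have pT : List.isPrefixOf ['f','o','u','r'] ['f','o','u','r'] = true := by decide
      simp [numsA, PySem.Dict.get?_mk_cons, calcLoopA, wordsB, hwin, pT, hn, hd0,
            ne1, ne2, pf_one, pf_two, pf_three]
    · -- target word "five" at i = -4
      rw [PySem.Str.endswith_eq] at h
      have hsuf : ['f','i','v','e'] <:+ line.toList := by
        have h2 := (PySem.Chars.endswith_iff _ _).mp h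
        rwa [(by decide : ("five" : String).toList = ['f','i','v','e'])] at h2
      generalize hs : line.toList = s at hsuf hpre ⊢
      obtain ⟨t, ht⟩ := hsuf
      have hlt : t.length + 4 = s.length := by rw [← ht]; simp
      have hdrop : List.drop (s.length - 4) s = ['f','i','v','e'] := by
        rw [← ht, (by simp : (t ++ ['f','i','v','e']).length - 4 = t.length), List.drop_left]
      have hg : PySem.List.pyGet? s (-4) = some 'f' := by
        rw [PySem.List.pyGet?_neg_ofNat s 4 (by norm_num) (by omega)]
        have h0 : (List.drop (s.length - 4) s)[0]? = some 'f' := by rw [hdrop]; rfl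
        rw [List.getElem?_drop] at h0
        simpa using h0
      simp only [hg]
      have hd0 : PySem.Chars.isdigit 'f' = false := by decide
      have ne1 : PySem.List.slice s (some (-4)) (some 0) ≠ ['f','o','u','r'] := by
        simp [slice_to_zero]
      have ne2 : PySem.List.slice s (some (-4)) (some 0) ≠ ['f','i','v','e'] := by
        simp [slice_to_zero]
      have hci : PySem.List.clampIdx s.length (-4) = s.length - 4 := by
        unfold PySem.List.clampIdx; split_ifs <;> omega
      have hwin : PySem.List.slice (PySem.List.slice s (some (-4)) none) none (some 5) = ['f','i','v','e'] := by
        rw [window_eq, hci, hdrop]; exact List.take_of_length_le (by decide)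
      have pf_one : List.isPrefixOf ['o','n','e'] ['f','i','v','e'] = false := by decide
      have pf_two : List.isPrefixOf ['t','w','o'] ['f','i','v','e'] = false := by decide
      have pf_three : List.isPrefixOf ['t','h','r','e','e'] ['f','i','v','e'] = false := by decide
      have pf_four : List.isPrefixOf ['f','o','u','r'] ['f','i','v','e'] = false := by decide
      have pT : List.isPrefixOf ['f','i','v','e'] ['f','i','v','e'] = true := by decide
      simp [numsA, PySem.Dict.get?_mk_cons, calcLoopA, wordsB, hwin, pT, hn, hd0,
            ne1, ne2, pf_one, pf_two, pf_three, pf_four]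
    · -- target word "nine" at i = -4
      rw [PySem.Str.endswith_eq] at h
      have hsuf : ['n','i','n','e'] <:+ line.toList := by
        have h2 := (PySem.Chars.endswith_iff _ _).mp h
        rwa [(by decide : ("nine" : String).toList = ['n','i','n','e'])] at h2
      generalize hs : line.toList = s at hsuf hpre ⊢
      obtain ⟨t, ht⟩ := hsuf
      have hlt : t.length + 4 = s.length := by rw [← ht]; simp
      have hdrop : List.drop (s.length - 4) s = ['n','i','n','e'] := by
        rw [← ht, (by simp : (t ++ ['n','i','n','e']).length - 4 = t.length), List.drop_left]
      have hg : PySem.List.pyGet? s (-4) = some 'n' := by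
        rw [PySem.List.pyGet?_neg_ofNat s 4 (by norm_num) (by omega)]
        have h0 : (List.drop (s.length - 4) s)[0]? = some 'n' := by rw [hdrop]; rfl
        rw [List.getElem?_drop] at h0
        simpa using h0
      simp only [hg]
      have hd0 : PySem.Chars.isdigit 'n' = false := by decide
      have ne1 : PySem.List.slice s (some (-4)) (some 0) ≠ ['n','i','n','e'] := by
        simp [slice_to_zero]
      have hci : PySem.List.clampIdx s.length (-4) = s.length - 4 := by
        unfold PySem.List.clampIdx; split_ifs <;> omega
      have hwin : PySem.List.slice (PySem.List.slice s (some (-4)) none) none (some 5) = ['n','i','n','e'] := by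
        rw [window_eq, hci, hdrop]; exact List.take_of_length_le (by decide)
      have pf_one : List.isPrefixOf ['o','n','e'] ['n','i','n','e'] = false := by decide
      have pf_two : List.isPrefixOf ['t','w','o'] ['n','i','n','e'] = false := by decide
      have pf_three : List.isPrefixOf ['t','h','r','e','e'] ['n','i','n','e'] = false := by decide
      have pf_four : List.isPrefixOf ['f','o','u','r'] ['n','i','n','e'] = false := by decide
      have pf_five : List.isPrefixOf ['f','i','v','e'] ['n','i','n','e'] = false := by decide
      have pf_six : List.isPrefixOf ['s','i','x'] ['n','i','n','e'] = false := by decide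
      have pf_seven : List.isPrefixOf ['s','e','v','e','n'] ['n','i','n','e'] = false := by decide
      have pf_eight : List.isPrefixOf ['e','i','g','h','t'] ['n','i','n','e'] = false := by decide
      have pT : List.isPrefixOf ['n','i','n','e'] ['n','i','n','e'] = true := by decide
      simp [numsA, PySem.Dict.get?_mk_cons, calcLoopA, wordsB, hwin, pT, hn, hd0,
            ne1, pf_one, pf_two, pf_three, pf_four, pf_five, pf_six, pf_seven, pf_eight]
  · -- i = -5 : three / seven / eight
    rcases hw with h | h | h
    · -- target word "three" at i = -5
      rw [PySem.Str.endswith_eq] at h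
      have hsuf : ['t','h','r','e','e'] <:+ line.toList := by
        have h2 := (PySem.Chars.endswith_iff _ _).mp h
        rwa [(by decide : ("three" : String).toList = ['t','h','r','e','e'])] at h2
      generalize hs : line.toList = s at hsuf hpre ⊢
      obtain ⟨t, ht⟩ := hsuf
      have hlt : t.length + 5 = s.length := by rw [← ht]; simp
      have hdrop : List.drop (s.length - 5) s = ['t','h','r','e','e'] := by
        rw [← ht, (by simp : (t ++ ['t','h','r','e','e']).length - 5 = t.length), List.drop_left]
      have hg : PySem.List.pyGet? s (-5) = some 't' := by
        rw [PySem.List.pyGet?_neg_ofNat s 5 (by norm_num) (by omega)]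
        have h0 : (List.drop (s.length - 5) s)[0]? = some 't' := by rw [hdrop]; rfl
        rw [List.getElem?_drop] at h0
        simpa using h0
      simp only [hg]
      have hd0 : PySem.Chars.isdigit 't' = false := by decide
      have ne1 : PySem.List.slice s (some (-5)) (some (-2)) ≠ ['t','w','o'] := by
        have hv : PySem.List.slice s (some (-5)) (some (-2)) = ['t','h','r'] := by
          simp only [PySem.List.slice]
          rw [(show PySem.List.clampIdx s.length (-5) = s.length - 5 from by
                unfold PySem.List.clampIdx; split_ifs <;> omega),
              (show PySem.List.clampIdx s.length (-2) = s.length - 2 from by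
                unfold PySem.List.clampIdx; split_ifs <;> omega),
              (show s.length - 2 - (s.length - 5) = 3 from by omega), hdrop]
          rfl
        rw [hv]; decide
      have ne2 : PySem.List.slice s (some (-5)) (some 0) ≠ ['t','h','r','e','e'] := by
        simp [slice_to_zero]
      have hci : PySem.List.clampIdx s.length (-5) = s.length - 5 := by
        unfold PySem.List.clampIdx; split_ifs <;> omega
      have hwin : PySem.List.slice (PySem.List.slice s (some (-5)) none) none (some 5) = ['t','h','r','e','e'] := by
        rw [window_eq, hci, hdrop]; exact List.take_of_length_le (by decide)
      have pf_one : List.isPrefixOf ['o','n','e'] ['t','h','r','e','e'] = false := by decide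
      have pf_two : List.isPrefixOf ['t','w','o'] ['t','h','r','e','e'] = false := by decide
      have pT : List.isPrefixOf ['t','h','r','e','e'] ['t','h','r','e','e'] = true := by decide
      simp [numsA, PySem.Dict.get?_mk_cons, calcLoopA, wordsB, hwin, pT, hn, hd0,
            ne1, ne2, pf_one, pf_two]
    · -- target word "seven" at i = -5
      rw [PySem.Str.endswith_eq] at h
      have hsuf : ['s','e','v','e','n'] <:+ line.toList := by
        have h2 := (PySem.Chars.endswith_iff _ _).mp h
        rwa [(by decide : ("seven" : String).toList = ['s','e','v','e','n'])] at h2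
      generalize hs : line.toList = s at hsuf hpre ⊢
      obtain ⟨t, ht⟩ := hsuf
      have hlt : t.length + 5 = s.length := by rw [← ht]; simp
      have hdrop : List.drop (s.length - 5) s = ['s','e','v','e','n'] := by
        rw [← ht, (by simp : (t ++ ['s','e','v','e','n']).length - 5 = t.length), List.drop_left]
      have hg : PySem.List.pyGet? s (-5) = some 's' := by
        rw [PySem.List.pyGet?_neg_ofNat s 5 (by norm_num) (by omega)]
        have h0 : (List.drop (s.length - 5) s)[0]? = some 's' := by rw [hdrop]; rfl
        rw [List.getElem?_drop] at h0
        simpa using h0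
      simp only [hg]
      have hd0 : PySem.Chars.isdigit 's' = false := by decide
      have ne1 : PySem.List.slice s (some (-5)) (some (-2)) ≠ ['s','i','x'] := by
        have hv : PySem.List.slice s (some (-5)) (some (-2)) = ['s','e','v'] := by
          simp only [PySem.List.slice]
          rw [(show PySem.List.clampIdx s.length (-5) = s.length - 5 from by
                unfold PySem.List.clampIdx; split_ifs <;> omega),
              (show PySem.List.clampIdx s.length (-2) = s.length - 2 from by
                unfold PySem.List.clampIdx; split_ifs <;> omega),
              (show s.length - 2 - (s.length - 5) = 3 from by omega), hdrop]
          rfl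
        rw [hv]; decide
      have ne2 : PySem.List.slice s (some (-5)) (some 0) ≠ ['s','e','v','e','n'] := by
        simp [slice_to_zero]
      have hci : PySem.List.clampIdx s.length (-5) = s.length - 5 := by
        unfold PySem.List.clampIdx; split_ifs <;> omega
      have hwin : PySem.List.slice (PySem.List.slice s (some (-5)) none) none (some 5) = ['s','e','v','e','n'] := by
        rw [window_eq, hci, hdrop]; exact List.take_of_length_le (by decide)
      have pf_one : List.isPrefixOf ['o','n','e'] ['s','e','v','e','n'] = false := by decide
      have pf_two : List.isPrefixOf ['t','w','o'] ['s','e','v','e','n'] = false := by decide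
      have pf_three : List.isPrefixOf ['t','h','r','e','e'] ['s','e','v','e','n'] = false := by decide
      have pf_four : List.isPrefixOf ['f','o','u','r'] ['s','e','v','e','n'] = false := by decide
      have pf_five : List.isPrefixOf ['f','i','v','e'] ['s','e','v','e','n'] = false := by decide
      have pf_six : List.isPrefixOf ['s','i','x'] ['s','e','v','e','n'] = false := by decide
      have pT : List.isPrefixOf ['s','e','v','e','n'] ['s','e','v','e','n'] = true := by decide
      simp [numsA, PySem.Dict.get?_mk_cons, calcLoopA, wordsB, hwin, pT, hn, hd0,
            ne1, ne2, pf_one, pf_two, pf_three, pf_four, pf_five, pf_six]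
    · -- target word "eight" at i = -5
      rw [PySem.Str.endswith_eq] at h
      have hsuf : ['e','i','g','h','t'] <:+ line.toList := by
        have h2 := (PySem.Chars.endswith_iff _ _).mp h
        rwa [(by decide : ("eight" : String).toList = ['e','i','g','h','t'])] at h2
      generalize hs : line.toList = s at hsuf hpre ⊢
      obtain ⟨t, ht⟩ := hsuf
      have hlt : t.length + 5 = s.length := by rw [← ht]; simp
      have hdrop : List.drop (s.length - 5) s = ['e','i','g','h','t'] := by
        rw [← ht, (by simp : (t ++ ['e','i','g','h','t']).length - 5 = t.length), List.drop_left]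
      have hg : PySem.List.pyGet? s (-5) = some 'e' := by
        rw [PySem.List.pyGet?_neg_ofNat s 5 (by norm_num) (by omega)]
        have h0 : (List.drop (s.length - 5) s)[0]? = some 'e' := by rw [hdrop]; rfl
        rw [List.getElem?_drop] at h0
        simpa using h0
      simp only [hg]
      have hd0 : PySem.Chars.isdigit 'e' = false := by decide
      have ne1 : PySem.List.slice s (some (-5)) (some 0) ≠ ['e','i','g','h','t'] := by
        simp [slice_to_zero]
      have hci : PySem.List.clampIdx s.length (-5) = s.length - 5 := by
        unfold PySem.List.clampIdx; split_ifs <;> omega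
      have hwin : PySem.List.slice (PySem.List.slice s (some (-5)) none) none (some 5) = ['e','i','g','h','t'] := by
        rw [window_eq, hci, hdrop]; exact List.take_of_length_le (by decide)
      have pf_one : List.isPrefixOf ['o','n','e'] ['e','i','g','h','t'] = false := by decide
      have pf_two : List.isPrefixOf ['t','w','o'] ['e','i','g','h','t'] = false := by decide
      have pf_three : List.isPrefixOf ['t','h','r','e','e'] ['e','i','g','h','t'] = false := by decide
      have pf_four : List.isPrefixOf ['f','o','u','r'] ['e','i','g','h','t'] = false := by decide
      have pf_five : List.isPrefixOf ['f','i','v','e'] ['e','i','g','h','t'] = false := by decide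
      have pf_six : List.isPrefixOf ['s','i','x'] ['e','i','g','h','t'] = false := by decide
      have pf_seven : List.isPrefixOf ['s','e','v','e','n'] ['e','i','g','h','t'] = false := by decide
      have pT : List.isPrefixOf ['e','i','g','h','t'] ['e','i','g','h','t'] = true := by decide
      simp [numsA, PySem.Dict.get?_mk_cons, calcLoopA, wordsB, hwin, pT, hn, hd0,
            ne1, pf_one, pf_two, pf_three, pf_four, pf_five, pf_six, pf_seven]

-- ===== VERDICT (by name: the statement is the Claim_ definition above) =====
theorem calc_py_spec : Claim_unchanged_calc_py := by
  intro line i n _ hpre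
  unfold Spec_calc_py
  intro hnD
  exact calc_agree line i n hpre hnD

theorem calc_py_changed : Claim_changed_calc_py := by
  unfold Claim_changed_calc_py; decide

theorem calc_py_tight : Claim_exact_calc_py := by
  intro line i n _ hpre hD
  exact tight_all line i n hpre hD
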